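-- pv_equiv track=rewrite | github.com/devskale/offpunk | unmerdify.py | get_possible_config_file_names_for_host
-- ===== SOURCE A (Python) =====
-- def get_possible_config_file_names_for_host(
--     host: str, file_extension: str = ".txt"
-- ) -> list[str]:
--     """
--     The five filters config files can be of the form
--
--     - .specific.domain.tld (for *.specific.domain.tld)
--     - specific.domain.tld (for this specific domain)
--     - .domain.tld (for *.domain.tld)
--     - domain.tld (for domain.tld)
--     """
--
--     parts = host.split(".")
--
--     if len(parts) < 2:
--         raise ValueError(
--             f"The host must be of the form `host.com`. It seems that there is no dot in the provided host: {host}"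
--         )
--
--     tld = parts.pop()
--     domain = parts.pop()
--
--     first_possible_name = f"{domain}.{tld}{file_extension}"
--     possible_names = [first_possible_name, f".{first_possible_name}"]
--
--     # While we still have parts in the domain name, prepend the part
--     # and create the 2 new possible names
--     while len(parts) > 0:
--         next_part = parts.pop()
--         possible_name = f"{next_part}.{possible_names[-2]}"
--         possible_names.append(possible_name)
--         possible_names.append(f".{possible_name}")
--
--     # Put the most specific file names first
--     possible_names.reverse()
--
--     return possible_names
-- ===== SOURCE B (Python) =====
-- def get_possible_config_file_names_for_host(
--     host: str, file_extension: str = ".txt"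
-- ) -> list[str]:
--     parts = host.split(".")
--
--     if len(parts) < 2:
--         raise ValueError(
--             f"The host must be of the form `host.com`. It seems that there is no dot in the provided host: {host}"
--         )
--
--     result = []
--     for i in range(len(parts) - 1):
--         name = ".".join(parts[i:]) + file_extension
--         result.append("." + name)
--         result.append(name)
--     return result
-- ===== Notes on version B (the rewrite author's own statement) =====
-- stated objective: simpler
-- what changed: B replaces A's incremental build (popping parts and extending each new name from the previous list entry, then reversing) by directly emitting, for each index i, the suffix '.'.join(parts[i:]) + extension, already in most-specific-first order with no back-references and no final reverse.
import Mathlib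
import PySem

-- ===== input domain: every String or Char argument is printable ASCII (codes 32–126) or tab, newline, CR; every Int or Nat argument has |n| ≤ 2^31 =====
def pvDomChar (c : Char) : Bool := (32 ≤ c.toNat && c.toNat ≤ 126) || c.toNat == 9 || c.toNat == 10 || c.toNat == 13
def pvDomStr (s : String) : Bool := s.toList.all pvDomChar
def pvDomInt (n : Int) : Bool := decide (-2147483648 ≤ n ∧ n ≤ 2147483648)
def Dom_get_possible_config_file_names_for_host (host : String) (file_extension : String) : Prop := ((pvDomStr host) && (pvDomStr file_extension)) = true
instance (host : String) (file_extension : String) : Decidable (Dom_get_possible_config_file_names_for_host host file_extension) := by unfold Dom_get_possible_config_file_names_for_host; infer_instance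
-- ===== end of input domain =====

-- B emits each suffix name directly by index (".".join(parts[i:]) + ext), already in
-- most-specific-first order, replacing A's pop-and-extend-from-previous-entry build and
-- its final reverse: a simpler decomposition, same cost.

-- ===== PORT A =====
-- A's while-loop: parts.pop() takes the LAST remaining part; `stack` holds the remaining
-- parts in pop order (reversed), so popping is taking the head.
def pvALoop : List String → List String → List String
  | [], names => names
  | p :: rest, names =>
    -- possible_names[-2]; the list always has ≥ 2 elements, so the default "" is never used
    let name := p ++ "." ++ ((PySem.List.pyGet? names (-2)).getD "")
    pvALoop rest (names ++ [name, "." ++ name])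

def get_possible_config_file_names_for_host (host : String) (file_extension : String) : List String :=
  let parts := (PySem.Str.split? host ".").getD []   -- sep "." ≠ "", so split? is always `some`
  if parts.length < 2 then []                        -- Python raises ValueError here; Pre_ excludes it
  else
    match parts.reverse with                         -- tld = parts.pop(); domain = parts.pop()
    | tld :: domain :: restRev =>
      let first := domain ++ "." ++ tld ++ file_extension
      (pvALoop restRev [first, "." ++ first]).reverse
    | _ => []                                        -- unreachable: parts.length ≥ 2

-- ===== PORT B =====
def get_possible_config_file_names_for_host_alt (host : String) (file_extension : String) : List String :=
  let parts := (PySem.Str.split? host ".").getD []   -- sep "." ≠ "", so split? is always `some`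
  if parts.length < 2 then []                        -- Python raises ValueError here; Pre_ excludes it
  else
    (List.range (parts.length - 1)).foldl
      (fun acc i =>
        let name := PySem.Str.join "." (parts.drop i) ++ file_extension
        acc ++ ["." ++ name, name]) []

-- ===== PRECONDITION & SPEC =====
-- Pre_ excludes exactly the hosts without a dot (split yields fewer than 2 parts), on
-- which Python A raises ValueError.
def Pre_get_possible_config_file_names_for_host (host : String) (_file_extension : String) : Prop :=
  2 ≤ ((PySem.Str.split? host ".").getD []).length
instance (host : String) (file_extension : String) : Decidable (Pre_get_possible_config_file_names_for_host host file_extension) := by unfold Pre_get_possible_config_file_names_for_host; infer_instance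

def pvWitness_get_possible_config_file_names_for_host : String × String := ("a.b.c", ".txt")

def Spec_get_possible_config_file_names_for_host (host : String) (file_extension : String) (out : List String) : Prop := out = get_possible_config_file_names_for_host_alt host file_extension
instance (host : String) (file_extension : String) (out : List String) : Decidable (Spec_get_possible_config_file_names_for_host host file_extension out) := by unfold Spec_get_possible_config_file_names_for_host; infer_instance

-- ===== CLAIM (what is proved, stated in full; the proofs are below) =====
def Claim_equal_get_possible_config_file_names_for_host : Prop := ∀ (host : String) (file_extension : String), Dom_get_possible_config_file_names_for_host host file_extension → Pre_get_possible_config_file_names_for_host host file_extension → Spec_get_possible_config_file_names_for_host host file_extension (get_possible_config_file_names_for_host host file_extension)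

-- ===== LEMMAS AND PROOFS =====

theorem pvStrJoinCons (a b : String) (l : List String) :
    PySem.Str.join "." (a :: b :: l) = a ++ "." ++ PySem.Str.join "." (b :: l) := by
  apply String.toList_inj.mp
  simp [PySem.Str.toList_join, String.toList_append, PySem.Chars.join_cons_cons]

theorem pvStrJoin2 (a b : String) : PySem.Str.join "." [a, b] = a ++ "." ++ b := by
  apply String.toList_inj.mp
  simp [PySem.Str.toList_join, String.toList_append, PySem.Chars.join_cons_cons,
    PySem.Chars.join_singleton]

theorem pvGetNeg2 (acc : List String) (s d : String) :
    PySem.List.pyGet? (acc ++ [s, d]) (-2) = some s := by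
  simp [PySem.List.pyGet?, PySem.List.pyIdx?]

theorem pvALoop_append (xs ys names : List String) :
    pvALoop (xs ++ ys) names = pvALoop ys (pvALoop xs names) := by
  induction xs generalizing names with
  | nil => rfl
  | cons p rest ih => simp [pvALoop, ih]

-- A's loop, run on the reversed prefix u, produces exactly the suffix-name blocks
-- [sᵢ, "." ++ sᵢ] for i = |u| down to 0, where sᵢ = ".".join((u ++ [d, t])[i:]) + ext.
theorem pvMain (u : List String) (d t ext : String) :
    pvALoop u.reverse [d ++ "." ++ t ++ ext, "." ++ (d ++ "." ++ t ++ ext)] =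
      ((List.range (u.length + 1)).reverse).flatMap
        (fun i => [PySem.Str.join "." ((u ++ [d, t]).drop i) ++ ext,
                   "." ++ (PySem.Str.join "." ((u ++ [d, t]).drop i) ++ ext)]) := by
  induction u with
  | nil => simp [pvALoop, pvStrJoin2]
  | cons p u' ih =>
    have hsplit : ∀ n : Nat, (List.range (n + 1)).reverse
        = ((List.range n).reverse).map Nat.succ ++ [0] := by
      intro n; rw [List.range_succ_eq_map]; simp
    obtain ⟨q, rest, hq⟩ : ∃ q rest, u' ++ [d, t] = q :: rest := by
      cases h : u' ++ [d, t] with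
      | nil => simp at h
      | cons q rest => exact ⟨q, rest, rfl⟩
    have hjoin : PySem.Str.join "." (p :: (u' ++ [d, t]))
        = p ++ "." ++ PySem.Str.join "." (u' ++ [d, t]) := by
      rw [hq]; exact pvStrJoinCons p q rest
    have hlhs : (p :: u').reverse = u'.reverse ++ [p] := by simp
    rw [hlhs, pvALoop_append, ih, hsplit u'.length, List.flatMap_append]
    simp only [List.flatMap_cons, List.flatMap_nil, List.append_nil, List.drop_zero]
    simp only [pvALoop]
    rw [pvGetNeg2]
    simp only [List.length_cons]
    rw [hsplit (u'.length + 1), List.flatMap_append]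
    simp only [List.flatMap_cons, List.flatMap_nil, List.append_nil, List.drop_zero,
      List.flatMap_map, Option.getD_some]
    rw [hsplit u'.length, List.flatMap_append]
    simp only [List.cons_append, List.flatMap_cons, List.flatMap_nil, List.append_nil,
      List.drop_zero, List.flatMap_map, Nat.succ_eq_add_one, List.drop_succ_cons, hjoin,
      List.append_assoc, String.append_assoc]

theorem pvFoldlBlocks (l : List Nat) (h : Nat → List String) (acc : List String) :
    l.foldl (fun acc i => acc ++ h i) acc = acc ++ l.flatMap h := by
  induction l generalizing acc with
  | nil => simp
  | cons x xs ih => simp [ih]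

-- ===== VERDICT (by name: the statement is the Claim_ definition above) =====
theorem get_possible_config_file_names_for_host_spec : Claim_equal_get_possible_config_file_names_for_host := by
  intro host ext _ hpre
  unfold Spec_get_possible_config_file_names_for_host
  unfold Pre_get_possible_config_file_names_for_host at hpre
  unfold get_possible_config_file_names_for_host get_possible_config_file_names_for_host_alt
  generalize hP : (PySem.Str.split? host ".").getD [] = parts at hpre ⊢
  have hlen : ¬ parts.length < 2 := by omega
  simp only [hlen, if_false]
  have hrl : 2 ≤ parts.reverse.length := by simpa using hpre
  rcases hr : parts.reverse with _ | ⟨tld, _ | ⟨domain, restRev⟩⟩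
  · rw [hr] at hrl; simp at hrl
  · rw [hr] at hrl; simp at hrl
  · have hps : parts = restRev.reverse ++ [domain, tld] := by
      have := congrArg List.reverse hr
      simpa using this
    simp only
    have hM := pvMain restRev.reverse domain tld ext
    rw [List.reverse_reverse] at hM
    rw [hM]
    have hlen2 : parts.length - 1 = restRev.reverse.length + 1 := by
      rw [hps]; simp
    rw [hlen2, pvFoldlBlocks, List.reverse_flatMap]
    simp only [List.reverse_reverse, List.nil_append]
    rw [hps]
    simp [Function.comp_def]
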